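-- pv_equiv track=rewrite | github.com/azzammuhyala/brainfuck | brainfuck.py | bf_tokens
-- ===== SOURCE A (Python) =====
-- import typing
--
-- def bf_tokens(source: str) -> typing.List[typing.Tuple[int, typing.Literal['<', '>', '+', '-', '.', ',', '[', ']']]]:
--
--     """
--     Converts brainfuck source code to token chunks.
--     Supports "#" comment feature and ignores invalid characters.
--     """
--
--     if not isinstance(source, str):
--         raise TypeError("bf_tokens() source must be string")
--
--     comment = False
--     tokens = []
--
--     for index, char in enumerate(source):
--
--         if not comment and char == '#':
--             comment = True
--         elif comment and char == '\n':
--             comment = False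
--
--         if not comment and char in '<>+-.,[]':
--             tokens.append((index, char))
--
--     return tokens
-- ===== SOURCE B (Python) =====
-- def bf_tokens(source):
--     """Line-based rewrite: split on newlines, scan each line's pre-'#' prefix."""
--     if not isinstance(source, str):
--         raise TypeError("bf_tokens() source must be string")
--     tokens = []
--     offset = 0
--     for line in source.split('\n'):
--         code = line.split('#', 1)[0]
--         for i, char in enumerate(code):
--             if char in '<>+-.,[]':
--                 tokens.append((offset + i, char))
--         offset += len(line) + 1
--     return tokens
-- ===== Notes on version B (the rewrite author's own statement) =====
-- stated objective: alternative
-- what changed: Replaced the per-character comment-flag state machine by a line-based decomposition: split the source on '\n', keep only each line's prefix before the first '#', and emit tokens with a running absolute offset.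
import Mathlib
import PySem

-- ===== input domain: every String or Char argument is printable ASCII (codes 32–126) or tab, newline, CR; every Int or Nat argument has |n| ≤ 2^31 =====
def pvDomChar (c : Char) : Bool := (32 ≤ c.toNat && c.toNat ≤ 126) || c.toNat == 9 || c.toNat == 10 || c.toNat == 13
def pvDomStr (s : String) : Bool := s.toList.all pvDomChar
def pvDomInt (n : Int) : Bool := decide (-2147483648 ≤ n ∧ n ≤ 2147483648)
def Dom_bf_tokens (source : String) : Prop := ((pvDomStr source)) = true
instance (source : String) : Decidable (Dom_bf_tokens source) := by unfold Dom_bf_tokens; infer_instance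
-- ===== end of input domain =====

-- B replaces A's per-character comment-flag state machine by a line-based decomposition
-- (split on '\n', scan each line's prefix before the first '#' with a running offset);
-- same cost, different structure ("alternative").

-- shared by both ports: `char in '<>+-.,[]'`
def bfChar (c : Char) : Bool := "<>+-.,[]".toList.contains c

-- ===== PORT A =====
-- literal port of A: fold over enumerate(source) carrying the (comment, tokens) state
def bf_tokens (source : String) : List (Int × String) :=
  ((PySem.List.enumerate source.toList 0).foldl
    (fun (st : Bool × List (Int × String)) (p : Int × Char) =>
      let comment :=
        if !st.1 && p.2 == '#' then true
        else if st.1 && p.2 == '\n' then false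
        else st.1
      let tokens :=
        if !comment && bfChar p.2 then st.2 ++ [(p.1, p.2.toString)] else st.2
      (comment, tokens))
    (false, [])).2

-- ===== PORT B =====
-- port of B's per-line loop; `line.split('#', 1)[0]` is ported as the head of `splitOn '#'`
def bfAltGo : List (List Char) → Int → List (Int × String)
  | [], _ => []
  | line :: rest, offset =>
    let code := (line.splitOn '#').headI
    (((PySem.List.enumerate code 0).filter (fun p => bfChar p.2)).map
      (fun p => (offset + p.1, p.2.toString)))
    ++ bfAltGo rest (offset + line.length + 1)

def bf_tokens_alt (source : String) : List (Int × String) :=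
  bfAltGo (source.toList.splitOn '\n') 0

-- ===== PRECONDITION & SPEC =====
def Spec_bf_tokens (source : String) (out : List (Int × String)) : Prop := out = bf_tokens_alt source
instance (source : String) (out : List (Int × String)) : Decidable (Spec_bf_tokens source out) := by unfold Spec_bf_tokens; infer_instance

-- ===== CLAIM (what is proved, stated in full; the proofs are below) =====
def Claim_equal_bf_tokens : Prop := ∀ (source : String), Dom_bf_tokens source → Spec_bf_tokens source (bf_tokens source)

-- ===== LEMMAS AND PROOFS =====

-- A's fold rewritten as a structural recursion emitting tokens in front
def runA : List (Int × Char) → Bool → List (Int × String)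
  | [], _ => []
  | p :: rest, comment =>
    let comment' :=
      if !comment && p.2 == '#' then true
      else if comment && p.2 == '\n' then false
      else comment
    (if !comment' && bfChar p.2 then [(p.1, p.2.toString)] else []) ++ runA rest comment'

theorem foldA_eq_runA (l : List (Int × Char)) :
    ∀ (comment : Bool) (acc : List (Int × String)),
    (l.foldl
      (fun (st : Bool × List (Int × String)) (p : Int × Char) =>
        let c :=
          if !st.1 && p.2 == '#' then true
          else if st.1 && p.2 == '\n' then false
          else st.1
        let t := if !c && bfChar p.2 then st.2 ++ [(p.1, p.2.toString)] else st.2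
        (c, t))
      (comment, acc)).2 = acc ++ runA l comment := by
  induction l with
  | nil => intro comment acc; simp [runA]
  | cons p rest ih =>
    intro comment acc
    simp only [List.foldl_cons, runA]
    rw [ih]
    split_ifs <;> simp

theorem bf_tokens_eq_runA (source : String) :
    bf_tokens source = runA (PySem.List.enumerate source.toList 0) false := by
  unfold bf_tokens
  rw [foldA_eq_runA]
  simp

theorem enumerate_shift' (xs : List Char) :
    ∀ (j i : Int), PySem.List.enumerate xs (i + j) =
      (PySem.List.enumerate xs j).map (fun p => (i + p.1, p.2)) := by
  induction xs with
  | nil => intro j i; simp [PySem.List.enumerate_nil]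
  | cons x xs ih =>
    intro j i
    simp only [PySem.List.enumerate_cons, List.map_cons]
    have := ih (j + 1) i
    rw [show i + j + 1 = i + (j + 1) by ring, this]

theorem enumerate_shift (xs : List Char) (i : Int) :
    PySem.List.enumerate xs i = (PySem.List.enumerate xs 0).map (fun p => (i + p.1, p.2)) := by
  have := enumerate_shift' xs 0 i
  simpa using this

-- inside a comment, a newline-free chunk emits nothing
theorem runA_comment (l : List Char) :
    ∀ (i : Int), '\n' ∉ l → runA (PySem.List.enumerate l i) true = [] := by
  induction l with
  | nil => intro i _; simp [PySem.List.enumerate_nil, runA]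
  | cons c rest ih =>
    intro i h
    have hc : c ≠ '\n' := fun hh => h (hh ▸ List.mem_cons_self)
    have hr : '\n' ∉ rest := fun hh => h (List.mem_cons_of_mem _ hh)
    simp only [PySem.List.enumerate_cons, runA]
    simp [hc, ih _ hr]

-- inside a comment, a newline-free chunk followed by '\n' resumes with comment off
theorem runA_comment_nl (l : List Char) :
    ∀ (i : Int) (rest : List Char), '\n' ∉ l →
    runA (PySem.List.enumerate (l ++ '\n' :: rest) i) true =
      runA (PySem.List.enumerate rest (i + l.length + 1)) false := by
  induction l with
  | nil =>
    intro i rest _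
    have hb : bfChar '\n' = false := by decide
    simp [PySem.List.enumerate_cons, runA, hb]
  | cons c l ih =>
    intro i rest h
    have hc : c ≠ '\n' := fun hh => h (hh ▸ List.mem_cons_self)
    have hl : '\n' ∉ l := fun hh => h (List.mem_cons_of_mem _ hh)
    have hcb : (c == '\n') = false := by simp [hc]
    simp only [List.cons_append, PySem.List.enumerate_cons, runA, Bool.not_true,
      Bool.false_and, hcb, Bool.false_eq_true, if_false, Bool.and_false]
    rw [ih (i + 1) rest hl]
    simp only [List.nil_append, List.length_cons]
    congr 2
    push_cast
    ring

-- A's machine on one newline-free line, comment off: B's per-line tokens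
theorem runA_line (l : List Char) :
    ∀ (i : Int), '\n' ∉ l →
    runA (PySem.List.enumerate l i) false =
      ((PySem.List.enumerate (l.takeWhile (· ≠ '#')) i).filter (fun p => bfChar p.2)).map
        (fun p => (p.1, p.2.toString)) := by
  induction l with
  | nil => intro i _; simp [PySem.List.enumerate_nil, runA]
  | cons c l ih =>
    intro i h
    have hl : '\n' ∉ l := fun hh => h (List.mem_cons_of_mem _ hh)
    by_cases hc : c = '#'
    · subst hc
      simp only [PySem.List.enumerate_cons, runA, List.takeWhile_cons]
      have hb : bfChar '#' = false := by decide
      simp [runA_comment l (i + 1) hl, hb]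
    · have hcb : (c == '#') = false := by simp [hc]
      simp only [PySem.List.enumerate_cons, runA, List.takeWhile_cons,
        Bool.not_false, Bool.true_and, Bool.false_and, hcb, Bool.false_eq_true, if_false]
      rw [ih (i + 1) hl]
      simp [hc, List.filter_cons]
      split_ifs <;> simp

theorem runA_line_nl (l : List Char) :
    ∀ (rest : List Char) (i : Int), '\n' ∉ l →
    runA (PySem.List.enumerate (l ++ '\n' :: rest) i) false =
      ((PySem.List.enumerate (l.takeWhile (· ≠ '#')) i).filter (fun p => bfChar p.2)).map
        (fun p => (p.1, p.2.toString))
      ++ runA (PySem.List.enumerate rest (i + l.length + 1)) false := by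
  induction l with
  | nil =>
    intro rest i _
    simp only [List.nil_append, PySem.List.enumerate_cons, runA]
    have hb : bfChar '\n' = false := by decide
    simp [hb, PySem.List.enumerate_nil]
  | cons c l ih =>
    intro rest i h
    have hc : c ≠ '\n' := fun hh => h (hh ▸ List.mem_cons_self)
    have hl : '\n' ∉ l := fun hh => h (List.mem_cons_of_mem _ hh)
    by_cases hch : c = '#'
    · subst hch
      have hb : bfChar '#' = false := by decide
      simp only [List.cons_append, PySem.List.enumerate_cons, runA, List.takeWhile_cons]
      simp [hb, runA_comment_nl l (i + 1) rest hl]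
      congr 2
      ring
    · have hcb : (c == '#') = false := by simp [hch]
      simp only [List.cons_append, PySem.List.enumerate_cons, runA, List.takeWhile_cons,
        Bool.not_false, Bool.true_and, Bool.false_and, hcb, Bool.false_eq_true, if_false]
      rw [ih rest (i + 1) hl]
      simp only [List.length_cons]
      rw [show ((l.length + 1 : Nat) : Int) = (l.length : Int) + 1 by push_cast; ring]
      rw [show i + ((l.length : Int) + 1) + 1 = i + 1 + (l.length : Int) + 1 by ring]
      simp [hch, List.filter_cons]
      split_ifs <;> simp

-- the head of splitOn '#' is the prefix before the first '#'
theorem headI_splitOn_hash (l : List Char) :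
    (l.splitOn '#').headI = l.takeWhile (· ≠ '#') := by
  induction l with
  | nil => simp [List.splitOn, List.splitOnP_nil]
  | cons c l ih =>
    by_cases hc : c = '#'
    · subst hc; simp [List.splitOn, List.splitOnP_cons]
    · simp only [List.splitOn, List.splitOnP_cons] at *
      simp only [beq_iff_eq, hc, if_false, List.takeWhile_cons, decide_eq_true_eq]
      rw [if_pos hc]
      rcases hne : List.splitOnP (fun x => x == '#') l with _ | ⟨a, t⟩
      · exact absurd hne (List.splitOnP_ne_nil _ l)
      · simp only [List.modifyHead_cons, List.headI]
        rw [hne] at ih; simpa using congrArg (List.cons c) ih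

theorem splitOn_nl_of_not_mem (l : List Char) (h : '\n' ∉ l) :
    l.splitOn '\n' = [l] := by
  induction l with
  | nil => simp [List.splitOn, List.splitOnP_nil]
  | cons c l ih =>
    have hc : c ≠ '\n' := fun hh => h (hh ▸ List.mem_cons_self)
    have hl : '\n' ∉ l := fun hh => h (List.mem_cons_of_mem _ hh)
    simp only [List.splitOn, List.splitOnP_cons] at *
    rw [if_neg (by simp [hc]), ih hl]
    simp

theorem splitOn_nl_append (l rest : List Char) (h : '\n' ∉ l) :
    (l ++ '\n' :: rest).splitOn '\n' = l :: rest.splitOn '\n' := by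
  induction l with
  | nil => simp [List.splitOn, List.splitOnP_cons]
  | cons c l ih =>
    have hc : c ≠ '\n' := fun hh => h (hh ▸ List.mem_cons_self)
    have hl : '\n' ∉ l := fun hh => h (List.mem_cons_of_mem _ hh)
    simp only [List.splitOn, List.cons_append, List.splitOnP_cons] at *
    rw [if_neg (by simp [hc]), ih hl]
    simp

theorem emit_shift (tw : List Char) (i : Int) :
    ((PySem.List.enumerate tw i).filter (fun p => bfChar p.2)).map
        (fun p => (p.1, p.2.toString)) =
    ((PySem.List.enumerate tw 0).filter (fun p => bfChar p.2)).map
        (fun p => (i + p.1, p.2.toString)) := by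
  rw [enumerate_shift tw i, List.filter_map, List.map_map]
  rfl

theorem first_nl : ∀ (cs : List Char), '\n' ∈ cs →
    ∃ l rest, cs = l ++ '\n' :: rest ∧ '\n' ∉ l := by
  intro cs h
  induction cs with
  | nil => cases h
  | cons c cs ih =>
    by_cases hc : c = '\n'
    · exact ⟨[], cs, by simp [hc], by simp⟩
    · have : '\n' ∈ cs := by cases h with | head => exact absurd rfl hc | tail _ hm => exact hm
      obtain ⟨l, rest, heq, hnl⟩ := ih this
      exact ⟨c :: l, rest, by simp [heq], by simp [List.mem_cons, hnl, Ne.symm hc]⟩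

theorem main_lemma : ∀ (n : Nat) (cs : List Char), cs.length ≤ n → ∀ (i : Int),
    runA (PySem.List.enumerate cs i) false = bfAltGo (cs.splitOn '\n') i := by
  intro n
  induction n with
  | zero =>
    intro cs hlen i
    have : cs = [] := List.eq_nil_of_length_eq_zero (Nat.le_zero.mp hlen)
    subst this
    simp [PySem.List.enumerate_nil, runA, List.splitOn, List.splitOnP_nil, bfAltGo]
  | succ n ih =>
    intro cs hlen i
    by_cases hmem : '\n' ∈ cs
    · obtain ⟨l, rest, heq, hnl⟩ := first_nl cs hmem
      subst heq
      rw [splitOn_nl_append l rest hnl, runA_line_nl l rest i hnl]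
      simp only [bfAltGo, headI_splitOn_hash]
      rw [emit_shift, ih rest (by simp at hlen; omega) (i + l.length + 1)]
    · rw [splitOn_nl_of_not_mem cs hmem, runA_line cs i hmem]
      simp only [bfAltGo, headI_splitOn_hash, List.append_nil]
      rw [emit_shift]

-- ===== VERDICT (by name: the statement is the Claim_ definition above) =====
theorem bf_tokens_spec : Claim_equal_bf_tokens := by
  intro source _
  unfold Spec_bf_tokens bf_tokens_alt
  rw [bf_tokens_eq_runA]
  exact main_lemma source.toList.length source.toList le_rfl 0
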